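-- pv_equiv track=rewrite | github.com/fcontreras18/rmotr-python | variable_size_box.py | variable_size_box
-- ===== SOURCE A (Python) =====
-- def variable_size_box(num, char):
--     box = ''
--     for i in range(num):
--         row = ''
--         for j in range(num):
--             row += char
--         row += '\n'
--         box += row
--     return box
-- ===== SOURCE B (Python) =====
-- def variable_size_box(num, char):
--     return (char * num + '\n') * num
-- ===== Notes on version B (the rewrite author's own statement) =====
-- stated objective: simpler
-- what changed: Replaces the nested character-by-character accumulation loops with a single closed-form string-repetition expression (char*num + ' ') * num.
import Mathlib
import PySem

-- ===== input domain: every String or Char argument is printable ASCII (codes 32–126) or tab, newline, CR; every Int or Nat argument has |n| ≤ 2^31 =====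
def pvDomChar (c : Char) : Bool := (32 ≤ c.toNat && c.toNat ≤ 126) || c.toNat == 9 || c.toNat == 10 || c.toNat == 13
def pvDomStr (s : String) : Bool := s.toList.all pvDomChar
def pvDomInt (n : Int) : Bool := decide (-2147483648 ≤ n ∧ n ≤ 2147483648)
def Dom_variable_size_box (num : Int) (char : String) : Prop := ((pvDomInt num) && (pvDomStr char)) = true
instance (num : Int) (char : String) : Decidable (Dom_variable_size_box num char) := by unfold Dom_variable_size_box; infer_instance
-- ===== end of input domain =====

-- ===== PORT A =====
-- A: nested loops, appending char num times to build each row, then appending rows.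
def variable_size_box (num : Int) (char : String) : String :=
  (PySem.List.pyRange 0 num 1).foldl (fun box _ =>
    let row := (PySem.List.pyRange 0 num 1).foldl (fun row _ => row ++ char) ""
    box ++ (row ++ "\n")) ""

-- ===== PORT B =====
-- Python str * int: empty for non-positive counts.
def pyStrMul (s : String) (n : Int) : String :=
  String.join (List.replicate n.toNat s)

-- B: closed form (char * num + '\n') * num — builds the box by string repetition
-- instead of element-by-element accumulation (simpler, no explicit loops).
def variable_size_box_alt (num : Int) (char : String) : String :=
  pyStrMul (pyStrMul char num ++ "\n") num

-- ===== PRECONDITION & SPEC =====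
def Spec_variable_size_box (num : Int) (char : String) (out : String) : Prop := out = variable_size_box_alt num char
instance (num : Int) (char : String) (out : String) : Decidable (Spec_variable_size_box num char out) := by unfold Spec_variable_size_box; infer_instance

-- ===== CLAIM (what is proved, stated in full; the proofs are below) =====
def Claim_equal_variable_size_box : Prop := ∀ (num : Int) (char : String), Dom_variable_size_box num char → Spec_variable_size_box num char (variable_size_box num char)

-- ===== LEMMAS AND PROOFS =====

-- folding "append s" over any list equals appending s, list.length times
theorem foldl_append_shift (l : List String) (a b : String) :
    l.foldl (· ++ ·) (a ++ b) = a ++ l.foldl (· ++ ·) b := by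
  induction l generalizing b with
  | nil => rfl
  | cons x xs ih => simp only [List.foldl, String.append_assoc, ih]

theorem join_replicate_succ (n : Nat) (s : String) :
    String.join (List.replicate (n + 1) s) = s ++ String.join (List.replicate n s) := by
  have h := foldl_append_shift (List.replicate n s) s ""
  simpa [String.join, List.replicate_succ] using h

theorem foldl_append_const (l : List Int) (acc s : String) :
    l.foldl (fun r (_ : Int) => r ++ s) acc = acc ++ String.join (List.replicate l.length s) := by
  induction l generalizing acc with
  | nil => simp [String.join]
  | cons x xs ih =>
    simp only [List.foldl, ih, List.length_cons, join_replicate_succ, String.append_assoc]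

-- ===== VERDICT (by name: the statement is the Claim_ definition above) =====
theorem variable_size_box_spec : Claim_equal_variable_size_box := by
  intro num char _
  unfold Spec_variable_size_box variable_size_box variable_size_box_alt pyStrMul
  rw [foldl_append_const (acc := "")
        (s := (PySem.List.pyRange 0 num 1).foldl (fun row (_ : Int) => row ++ char) "" ++ "\n"),
      foldl_append_const (acc := "") (s := char)]
  simp [PySem.List.length_pyRange_one]
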